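-- pv_equiv track=rewrite | github.com/mjohnson11/VLTE_PIPELINES | WGS/.ipynb_checkpoints/process_files_and_run_go-checkpoint.py | get_group_mutation_impact
-- ===== SOURCE A (Python) =====
-- def get_group_mutation_impact(row, mg_counts, mg_to_impact):
--     if mg_counts[row['mutation_group']] == 1:
--         return row['mutation_impact']
--     else:
--         all_mut_impacts_in_group = mg_to_impact[row['mutation_group']]
--         for mt in mutation_impacts_in_consequence_order:
--             if mt in all_mut_impacts_in_group:
--                 return mt
--
-- mutation_impacts_in_consequence_order = ['HIGH', 'MODERATE', 'LOW', 'MODIFIER']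
-- ===== SOURCE B (Python) =====
-- mutation_impacts_in_consequence_order = ['HIGH', 'MODERATE', 'LOW', 'MODIFIER']
--
-- def get_group_mutation_impact(row, mg_counts, mg_to_impact):
--     if mg_counts[row['mutation_group']] == 1:
--         return row['mutation_impact']
--     rank = {impact: i for i, impact in enumerate(mutation_impacts_in_consequence_order)}
--     return min((m for m in mg_to_impact[row['mutation_group']] if m in rank),
--                key=rank.__getitem__, default=None)
-- ===== Notes on version B (the rewrite author's own statement) =====
-- stated objective: idiomatic
-- what changed: Instead of scanning the fixed priority list and testing membership in the group's impact list, B builds a rank dict once and takes min over the group's impacts (filtered to known impacts) keyed by rank, with default=None; Pre_ excludes only inputs where A raises KeyError (missing dict keys), where B raises too.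
import Mathlib
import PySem

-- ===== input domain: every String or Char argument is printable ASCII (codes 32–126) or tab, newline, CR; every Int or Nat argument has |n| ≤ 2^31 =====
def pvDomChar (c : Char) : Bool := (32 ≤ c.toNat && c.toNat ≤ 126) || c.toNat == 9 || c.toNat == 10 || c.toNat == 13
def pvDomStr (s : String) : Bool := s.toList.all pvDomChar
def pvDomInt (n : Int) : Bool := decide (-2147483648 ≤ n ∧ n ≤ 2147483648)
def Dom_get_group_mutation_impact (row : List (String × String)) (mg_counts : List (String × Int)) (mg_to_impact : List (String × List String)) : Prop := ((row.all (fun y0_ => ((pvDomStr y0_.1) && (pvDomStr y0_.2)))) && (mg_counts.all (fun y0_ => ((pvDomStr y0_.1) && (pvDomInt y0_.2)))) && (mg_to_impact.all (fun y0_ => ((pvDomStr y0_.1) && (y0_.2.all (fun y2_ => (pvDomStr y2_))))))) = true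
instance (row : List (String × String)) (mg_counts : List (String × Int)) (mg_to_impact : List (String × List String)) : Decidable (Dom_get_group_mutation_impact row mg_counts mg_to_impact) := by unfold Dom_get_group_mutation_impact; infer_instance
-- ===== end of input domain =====

-- B changes the strategy: a rank dict plus a single min-scan over the group's impacts,
-- instead of A's scan of the fixed priority list with membership tests (objective: idiomatic).

-- Python dict access on the association-list representation: first match.
def pvLookup? {α : Type} (d : List (String × α)) (k : String) : Option α :=
  (PySem.Dict.mk d).get? k

def pvOrder : List String := ["HIGH", "MODERATE", "LOW", "MODIFIER"]

-- ===== PORT A =====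
-- 'for mt in mutation_impacts_in_consequence_order: if mt in impacts: return mt'
def pvLoopA (order : List String) (impacts : List String) : Option String :=
  match order with
  | [] => none
  | mt :: rest => if impacts.contains mt then some mt else pvLoopA rest impacts

def get_group_mutation_impact (row : List (String × String)) (mg_counts : List (String × Int)) (mg_to_impact : List (String × List String)) : Option String :=
  match pvLookup? row "mutation_group" with
  | none => none  -- KeyError (outside Pre_)
  | some mg =>
    match pvLookup? mg_counts mg with
    | none => none  -- KeyError (outside Pre_)
    | some c =>
      if c = 1 then pvLookup? row "mutation_impact"  -- KeyError = none (outside Pre_)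
      else
        match pvLookup? mg_to_impact mg with
        | none => none  -- KeyError (outside Pre_)
        | some impacts => pvLoopA pvOrder impacts

-- ===== PORT B =====
-- rank = {impact: i for i, impact in enumerate(mutation_impacts_in_consequence_order)}
def pvRank : PySem.Dict String Int :=
  (PySem.List.enumerate pvOrder).foldl (fun d p => PySem.Dict.insert d p.2 p.1) PySem.Dict.empty

-- one step of Python's min over the filtered generator, key = rank.__getitem__ (first minimum kept)
def pvStep (acc : Option (String × Int)) (m : String) : Option (String × Int) :=
  match PySem.Dict.get? pvRank m with
  | none => acc  -- filtered out: m not in rank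
  | some r =>
    match acc with
    | none => some (m, r)
    | some (bm, br) => if r < br then some (m, r) else some (bm, br)

-- min((m for m in impacts if m in rank), key=rank.__getitem__, default=None)
def pvMinB (impacts : List String) : Option String :=
  (impacts.foldl pvStep none).map Prod.fst

def get_group_mutation_impact_alt (row : List (String × String)) (mg_counts : List (String × Int)) (mg_to_impact : List (String × List String)) : Option String :=
  match pvLookup? row "mutation_group" with
  | none => none
  | some mg =>
    match pvLookup? mg_counts mg with
    | none => none
    | some c =>
      if c = 1 then pvLookup? row "mutation_impact"
      else
        match pvLookup? mg_to_impact mg with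
        | none => none
        | some impacts => pvMinB impacts

-- ===== PRECONDITION & SPEC =====
-- Pre_ excludes exactly the inputs where the Python A raises KeyError: a missing
-- 'mutation_group' key, a group absent from mg_counts, a missing 'mutation_impact'
-- key when the count is 1, or a group absent from mg_to_impact otherwise.
def Pre_get_group_mutation_impact (row : List (String × String)) (mg_counts : List (String × Int)) (mg_to_impact : List (String × List String)) : Prop :=
  (match pvLookup? row "mutation_group" with
   | none => false
   | some mg =>
     match pvLookup? mg_counts mg with
     | none => false
     | some c =>
       if c = 1 then (pvLookup? row "mutation_impact").isSome
       else (pvLookup? mg_to_impact mg).isSome) = true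
instance (row : List (String × String)) (mg_counts : List (String × Int)) (mg_to_impact : List (String × List String)) : Decidable (Pre_get_group_mutation_impact row mg_counts mg_to_impact) := by unfold Pre_get_group_mutation_impact; infer_instance

def pvWitness_get_group_mutation_impact : (List (String × String)) × (List (String × Int)) × (List (String × List String)) :=
  ([("mutation_group", "g1"), ("mutation_impact", "LOW")], [("g1", 2)], [("g1", ["MODIFIER", "MODERATE"])])

def Spec_get_group_mutation_impact (row : List (String × String)) (mg_counts : List (String × Int)) (mg_to_impact : List (String × List String)) (out : Option String) : Prop := out = get_group_mutation_impact_alt row mg_counts mg_to_impact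
instance (row : List (String × String)) (mg_counts : List (String × Int)) (mg_to_impact : List (String × List String)) (out : Option String) : Decidable (Spec_get_group_mutation_impact row mg_counts mg_to_impact out) := by unfold Spec_get_group_mutation_impact; infer_instance

-- ===== CLAIM (what is proved, stated in full; the proofs are below) =====
def Claim_equal_get_group_mutation_impact : Prop := ∀ (row : List (String × String)) (mg_counts : List (String × Int)) (mg_to_impact : List (String × List String)), Dom_get_group_mutation_impact row mg_counts mg_to_impact → Pre_get_group_mutation_impact row mg_counts mg_to_impact → Spec_get_group_mutation_impact row mg_counts mg_to_impact (get_group_mutation_impact row mg_counts mg_to_impact)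

-- ===== LEMMAS AND PROOFS =====

-- the value B's fold computes, characterised by the four membership tests
def pvBest (xs : List String) : Option (String × Int) :=
  if xs.contains "HIGH" then some ("HIGH", 0)
  else if xs.contains "MODERATE" then some ("MODERATE", 1)
  else if xs.contains "LOW" then some ("LOW", 2)
  else if xs.contains "MODIFIER" then some ("MODIFIER", 3)
  else none

def pvCombine (a b : Option (String × Int)) : Option (String × Int) :=
  match a, b with
  | none, b => b
  | some p, none => some p
  | some (am, ar), some (bm, br) => if br < ar then some (bm, br) else some (am, ar)

lemma pvCombine_none_right (a : Option (String × Int)) : pvCombine a none = a := by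
  cases a <;> rfl

lemma pvRank_get (x : String) :
    PySem.Dict.get? pvRank x =
      if x = "HIGH" then some 0 else if x = "MODERATE" then some 1
      else if x = "LOW" then some 2 else if x = "MODIFIER" then some 3 else none := by
  have h : pvRank = PySem.Dict.mk [("HIGH", 0), ("MODERATE", 1), ("LOW", 2), ("MODIFIER", 3)] := by
    rfl
  rw [h]
  simp only [PySem.Dict.get?_mk_cons]
  split_ifs <;> simp_all
  rfl

lemma pvStep_combine (acc : Option (String × Int)) (x : String) :
    pvStep acc x = pvCombine acc (pvStep none x) := by
  unfold pvStep
  cases h : PySem.Dict.get? pvRank x with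
  | none => exact (pvCombine_none_right acc).symm
  | some r => cases acc with
    | none => rfl
    | some p => cases p; rfl

lemma pvCombine_assoc (a b c : Option (String × Int)) :
    pvCombine (pvCombine a b) c = pvCombine a (pvCombine b c) := by
  rcases a with _ | ⟨am, ar⟩
  · rfl
  rcases b with _ | ⟨bm, br⟩
  · rfl
  rcases c with _ | ⟨cm, cr⟩
  · rw [pvCombine_none_right, pvCombine_none_right]
  by_cases h1 : br < ar <;> by_cases h2 : cr < br <;> by_cases h3 : cr < ar <;>
    simp [pvCombine, h1, h2, h3] <;> omega

lemma pvBest_cons (x : String) (xs : List String) :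
    pvBest (x :: xs) = pvCombine (pvStep none x) (pvBest xs) := by
  simp only [pvStep, pvRank_get, pvBest, List.contains_cons]
  by_cases h1 : x = "HIGH" <;> by_cases h2 : x = "MODERATE" <;>
    by_cases h3 : x = "LOW" <;> by_cases h4 : x = "MODIFIER" <;>
    simp_all [pvCombine] <;> split_ifs <;> simp_all

lemma pvFold_char (xs : List String) (acc : Option (String × Int)) :
    xs.foldl pvStep acc = pvCombine acc (pvBest xs) := by
  induction xs generalizing acc with
  | nil => exact (pvCombine_none_right acc).symm
  | cons x xs ih =>
    rw [List.foldl_cons, ih, pvStep_combine, pvCombine_assoc, pvBest_cons]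

lemma pvLoopA_eq_pvMinB (xs : List String) : pvLoopA pvOrder xs = pvMinB xs := by
  unfold pvMinB
  rw [pvFold_char]
  simp only [pvCombine, pvBest, pvOrder, pvLoopA]
  split_ifs <;> rfl

-- ===== VERDICT (by name: the statement is the Claim_ definition above) =====
theorem get_group_mutation_impact_spec : Claim_equal_get_group_mutation_impact := by
  intro row mg_counts mg_to_impact _ _
  unfold Spec_get_group_mutation_impact get_group_mutation_impact get_group_mutation_impact_alt
  rcases pvLookup? row "mutation_group" with _ | mg
  · rfl
  dsimp only
  rcases pvLookup? mg_counts mg with _ | c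
  · rfl
  dsimp only
  by_cases hc : c = 1
  · rw [if_pos hc, if_pos hc]
  · rw [if_neg hc, if_neg hc]
    rcases pvLookup? mg_to_impact mg with _ | impacts
    · rfl
    exact pvLoopA_eq_pvMinB impacts
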